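-- pv_equiv track=rewrite | github.com/xinan/ultimate-ipad-crusher | code/dat/combinatorics.py | constCost
-- ===== SOURCE A (Python) =====
-- def constCost(N, L):
--   table = [[0 for x in range(N+1)] for x in range(L+1)]
--   for l in range(1, L+1):
--       table[l][1] = l + 5
--       for n in range(2, N+1):
--           table[l][n] = min([
--               1 + max(table[x-1][n-1] + 5, table[l-x][n]) for x in range(1, l+1)
--               ])
--   return table[L][N]
-- ===== SOURCE B (Python) =====
-- def constCost(N, L):
--     if L == 0:
--         return 0
--     # Invert the optimization: instead of minimizing cost per (cells, crushes),
--     # compute coverage g[c][n] = the maximum number of cells decidable with total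
--     # budget c using up to n crush levels (coverage recurrence
--     # g[c][n] = 1 + g[c-6][n-1] + g[c-1][n]), and return the first budget whose
--     # coverage reaches L.  Budget L + 5 always suffices (a single crush level
--     # with budget c covers c - 5 cells), so the range below always returns.
--     g = []
--     for c in range(L + 6):
--         col = [0] * (N + 1)
--         col[1] = max(c - 5, 0)
--         for n in range(2, N + 1):
--             if c >= 6:
--                 col[n] = 1 + g[c - 6][n - 1] + g[c - 1][n]
--         g.append(col)
--         if col[N] >= L:
--             return c
-- ===== Notes on version B (the rewrite author's own statement) =====
-- stated objective: faster
-- what changed: B inverts the optimization: instead of A's (L+1)x(N+1) min-cost table over (cells, crushes), it computes the coverage recurrence g[c][n] = 1 + g[c-6][n-1] + g[c-1][n] (max cells decidable with budget c and n crush levels) and returns the first budget whose coverage reaches L; Pre_ excludes the inputs (L<0, or N<=0 with L!=0) where A raises IndexError.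
import Mathlib
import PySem

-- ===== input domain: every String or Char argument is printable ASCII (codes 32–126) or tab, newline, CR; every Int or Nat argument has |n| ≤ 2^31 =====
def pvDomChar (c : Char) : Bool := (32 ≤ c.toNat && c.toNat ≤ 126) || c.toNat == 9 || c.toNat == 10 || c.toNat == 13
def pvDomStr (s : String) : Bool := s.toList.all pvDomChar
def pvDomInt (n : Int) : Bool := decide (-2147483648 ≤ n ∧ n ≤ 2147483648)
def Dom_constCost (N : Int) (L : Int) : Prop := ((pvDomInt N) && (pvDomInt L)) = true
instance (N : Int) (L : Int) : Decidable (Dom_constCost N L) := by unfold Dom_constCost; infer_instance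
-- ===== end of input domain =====

-- B inverts the optimization: instead of A's min-cost table over (cells, crushes) it computes
-- coverage (max cells decidable per budget) and returns the first budget covering L
-- (objective: faster, budget-bounded loop instead of A's O(L^2*N) table fill).

-- ===== PORT A =====
def pvGet2 (t : List (List Int)) (i j : Int) : Int :=
  PySem.List.pyGetD (PySem.List.pyGetD t i []) j 0

def pvSet2 (t : List (List Int)) (i j : Int) (v : Int) : List (List Int) :=
  PySem.List.pySetD t i (PySem.List.pySetD (PySem.List.pyGetD t i []) j v)

def constCost (N : Int) (L : Int) : Int :=
  let table0 := List.replicate (L+1).toNat (List.replicate (N+1).toNat 0)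
  let table := (PySem.List.pyRange 1 (L+1) 1).foldl
    (fun t l =>
      let t1 := pvSet2 t l 1 (l + 5)
      (PySem.List.pyRange 2 (N+1) 1).foldl
        (fun t2 n =>
          pvSet2 t2 l n ((PySem.List.min? ((PySem.List.pyRange 1 (l+1) 1).map
            (fun x => 1 + max (pvGet2 t2 (x-1) (n-1) + 5) (pvGet2 t2 (l-x) n)))
              (fun v => v)).getD 0))
        t1)
    table0
  pvGet2 table L N

-- ===== PORT B =====
-- one iteration of Source B's budget loop (the early return is the Option component)
def bstep (N L : Int) (st : List (List Int) × Option Int) (c : Int) :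
    List (List Int) × Option Int :=
  match st.2 with
  | some _ => st
  | none =>
    let col0 := List.replicate (N+1).toNat (0:Int)
    let col1 := PySem.List.pySetD col0 1 (max (c-5) 0)
    let col := (PySem.List.pyRange 2 (N+1) 1).foldl
      (fun cl n =>
        if 6 ≤ c then
          PySem.List.pySetD cl n
            (1 + PySem.List.pyGetD (PySem.List.pyGetD st.1 (c-6) []) (n-1) 0
               + PySem.List.pyGetD (PySem.List.pyGetD st.1 (c-1) []) n 0)
        else cl)
      col1
    if L ≤ PySem.List.pyGetD col N 0 then (st.1 ++ [col], some c)
    else (st.1 ++ [col], none)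

def constCost_alt (N : Int) (L : Int) : Int :=
  if L = 0 then 0
  else
    (((PySem.List.pyRange 0 (L+6) 1).foldl (bstep N L)
      (([] : List (List Int)), (none : Option Int))).2).getD 0

-- ===== PRECONDITION & SPEC =====
-- Pre_ excludes exactly the inputs where A raises IndexError: L < 0, or L ≥ 1 with N ≤ 0
-- (row l has no column 1), or L = 0 with N < 0 (table[0][N] out of range).
def Pre_constCost (N : Int) (L : Int) : Prop := (L = 0 ∧ 0 ≤ N) ∨ (1 ≤ L ∧ 1 ≤ N)
instance (N : Int) (L : Int) : Decidable (Pre_constCost N L) := by unfold Pre_constCost; infer_instance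

def pvWitness_constCost : Int × Int := (3, 5)

def Spec_constCost (N : Int) (L : Int) (out : Int) : Prop := out = constCost_alt N L
instance (N : Int) (L : Int) (out : Int) : Decidable (Spec_constCost N L out) := by unfold Spec_constCost; infer_instance

-- ===== CLAIM (what is proved, stated in full; the proofs are below) =====
def Claim_equal_constCost : Prop := ∀ (N : Int) (L : Int), Dom_constCost N L → Pre_constCost N L → Spec_constCost N L (constCost N L)

-- ===== LEMMAS AND PROOFS =====

-- The recurrence A computes: T n l = minimal worst-case cost for l cells with n crushes
-- (0 on the never-written border rows/columns of A's table).
def T : Nat → Nat → Int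
  | _, 0 => 0
  | 0, _+1 => 0
  | 1, l+1 => (l : Int) + 1 + 5
  | n+2, l+1 =>
    (PySem.List.min? ((List.range (l+1)).map (fun i =>
        1 + max (T (n+1) i + 5) (T (n+2) (l - i)))) (fun v => v)).getD 0
termination_by n l => (n, l)
decreasing_by
  · exact Prod.Lex.left _ _ (by omega)
  · exact Prod.Lex.right _ (by omega)

theorem T_zero (n : Nat) : T n 0 = 0 := by
  cases n with
  | zero => simp [T]
  | succ m => cases m <;> simp [T]

theorem T_zero_left (l : Nat) : T 0 l = 0 := by
  cases l <;> simp [T]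

-- Python's min([1 + max(prev[x-1]+5, cur[l-x]) for x in range(1, l+1)]) is T (nm+2) (k+1)
-- whenever the body evaluates to the recurrence's summand at every x = 1+j.
theorem key_min (nm k : Nat) (l : Int) (hl : l = ((k : Int) + 1)) (F : Int → Int)
    (hF : ∀ j : Nat, j ≤ k → F (1 + (j : Int)) = 1 + max (T (nm+1) j + 5) (T (nm+2) (k - j))) :
    (PySem.List.min? ((PySem.List.pyRange 1 (l+1) 1).map F) (fun v => v)).getD 0
      = T (nm+2) (k+1) := by
  subst hl
  rw [PySem.List.pyRange_one]
  have h1 : ((k : Int) + 1 + 1 - 1).toNat = k + 1 := by omega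
  rw [h1, List.map_map]
  rw [T]
  congr 1
  congr 1
  apply List.map_congr_left
  intro j hj
  simp only [Function.comp]
  exact hF j (by simpa using Nat.lt_succ_iff.mp (List.mem_range.mp hj))

-- ===== A side =====

def rowFull (NN r : Nat) : List Int := (List.range (NN+1)).map (fun c => T c r)

def rowPart (NN nn r : Nat) : List Int :=
  (List.range (NN+1)).map (fun c => if 1 ≤ c ∧ c ≤ nn then T c r else 0)

def matF (LL NN lm : Nat) : List (List Int) :=
  (List.range (LL+1)).map (fun r => if r ≤ lm then rowFull NN r else List.replicate (NN+1) 0)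

def matI (LL NN lm nn : Nat) : List (List Int) :=
  (List.range (LL+1)).map (fun r =>
    if r ≤ lm then rowFull NN r
    else if r = lm+1 then rowPart NN nn (lm+1)
    else List.replicate (NN+1) 0)

theorem rowFull_zero (NN : Nat) : rowFull NN 0 = List.replicate (NN+1) 0 := by
  unfold rowFull
  rw [show (fun c => T c 0) = (fun _ : Nat => (0:Int)) from funext (fun c => T_zero c)]
  simp [List.map_const']

theorem matF_zero (LL NN : Nat) :
    matF LL NN 0 = List.replicate (LL+1) (List.replicate (NN+1) 0) := by
  apply List.ext_getElem
  · simp [matF]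
  intro i h1 h2
  simp only [matF, List.getElem_map, List.getElem_range, List.getElem_replicate]
  rcases Nat.eq_zero_or_pos i with hi | hi
  · subst hi; simp [rowFull_zero]
  · rw [if_neg (by omega)]

theorem pvGet2_natCast (t : List (List Int)) (r c : Nat) :
    pvGet2 t (r : Int) (c : Int) = (t.getD r []).getD c 0 := by
  simp [pvGet2]

theorem pvSet2_cast (t : List (List Int)) (r : Nat) (j : Int) (v : Int) (hj : 0 ≤ j) :
    pvSet2 t (r : Int) j v = t.set r ((t.getD r []).set j.toNat v) := by
  simp [pvSet2, PySem.List.pySetD_of_nonneg _ _ hj]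

theorem matI_read (LL NN lm nn r c : Nat) (hr : r ≤ lm) (hrL : lm ≤ LL) (hc : c ≤ NN) :
    pvGet2 (matI LL NN lm nn) (r : Int) (c : Int) = T c r := by
  rw [pvGet2_natCast]
  unfold matI
  rw [PySem.List.getD_map_range _ _ _ _ (by omega), if_pos hr]
  unfold rowFull
  rw [PySem.List.getD_map_range _ _ _ _ (by omega)]

theorem set_col1 (LL NN lm : Nat) (hlm : lm + 1 ≤ LL) :
    pvSet2 (matF LL NN lm) ((lm+1 : Nat) : Int) 1 (((lm+1 : Nat) : Int) + 5)
      = matI LL NN lm 1 := by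
  rw [pvSet2_cast _ _ _ _ (by omega)]
  unfold matF matI
  rw [PySem.List.getD_map_range _ _ _ _ (by omega), if_neg (by omega)]
  apply List.ext_getElem
  · simp
  intro i h1 h2
  rw [List.getElem_set]
  simp only [List.getElem_map, List.getElem_range]
  by_cases hi : lm + 1 = i
  · subst hi
    rw [if_pos rfl, if_neg (by omega), if_pos rfl]
    apply List.ext_getElem
    · simp [rowPart]
    intro c hc1 hc2
    rw [List.getElem_set]
    simp only [rowPart, List.getElem_map, List.getElem_range, List.getElem_replicate]
    by_cases hc : (1:Int).toNat = c
    · rw [if_pos hc, if_pos (by omega)]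
      have : c = 1 := by omega
      subst this
      show ((lm:Int)+1) + 5 = T 1 (lm+1)
      simp [T]
    · rw [if_neg hc, if_neg (by omega)]
  · rw [if_neg hi]
    by_cases hle : i ≤ lm
    · rw [if_pos hle, if_pos hle]
    · rw [if_neg hle, if_neg hle, if_neg (by omega)]

theorem set_inner (LL NN lm nn : Nat) (hlm : lm + 1 ≤ LL) :
    pvSet2 (matI LL NN lm nn) ((lm+1 : Nat) : Int) ((nn+1 : Nat) : Int) (T (nn+1) (lm+1))
      = matI LL NN lm (nn+1) := by
  rw [pvSet2_cast _ _ _ _ (by omega)]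
  unfold matI
  rw [PySem.List.getD_map_range _ _ _ _ (by omega), if_neg (by omega), if_pos rfl]
  apply List.ext_getElem
  · simp
  intro i h1 h2
  rw [List.getElem_set]
  simp only [List.getElem_map, List.getElem_range]
  by_cases hi : lm + 1 = i
  · subst hi
    rw [if_pos rfl, if_neg (by omega), if_pos rfl]
    apply List.ext_getElem
    · simp [rowPart]
    intro c hc1 hc2
    rw [List.getElem_set]
    simp only [rowPart, List.getElem_map, List.getElem_range]
    have htn : ((nn+1 : Nat) : Int).toNat = nn + 1 := by omega
    rw [htn]
    by_cases hc : nn + 1 = c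
    · subst hc
      rw [if_pos rfl, if_pos (by omega)]
    · rw [if_neg hc]
      by_cases hcc : 1 ≤ c ∧ c ≤ nn
      · rw [if_pos hcc, if_pos (by omega)]
      · rw [if_neg hcc, if_neg (by omega)]
  · rw [if_neg hi]
    by_cases hle : i ≤ lm
    · rw [if_pos hle, if_pos hle]
    · rw [if_neg hle, if_neg hle, if_neg (by omega), if_neg (by omega)]

theorem matI_full (LL NN lm : Nat) : matI LL NN lm NN = matF LL NN (lm+1) := by
  unfold matI matF
  apply List.ext_getElem
  · simp
  intro i h1 h2
  simp only [List.getElem_map, List.getElem_range]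
  by_cases hle : i ≤ lm
  · rw [if_pos hle, if_pos (by omega)]
  · by_cases hi : i = lm + 1
    · subst hi
      rw [if_neg hle, if_pos rfl, if_pos (by omega)]
      unfold rowPart rowFull
      apply List.map_congr_left
      intro c hcm
      have hc : c < NN + 1 := List.mem_range.mp hcm
      by_cases h1c : 1 ≤ c
      · rw [if_pos ⟨h1c, by omega⟩]
      · have : c = 0 := by omega
        subst this
        rw [if_neg (by omega), T_zero_left]
    · rw [if_neg hle, if_neg hi, if_neg (by omega)]

theorem matF_read (LL NN lm r c : Nat) (hr : r ≤ lm) (hrL : r ≤ LL) (hc : c ≤ NN) :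
    pvGet2 (matF LL NN lm) (r : Int) (c : Int) = T c r := by
  rw [pvGet2_natCast]
  unfold matF
  rw [PySem.List.getD_map_range _ _ _ _ (by omega), if_pos hr]
  unfold rowFull
  rw [PySem.List.getD_map_range _ _ _ _ (by omega)]

theorem A_inner (LL NN lm nn : Nat) (hlm : lm+1 ≤ LL) (h1 : 1 ≤ nn) (hnn : nn ≤ NN) :
    (PySem.List.pyRange 2 ((nn : Int)+1) 1).foldl
      (fun t2 n => pvSet2 t2 ((lm+1 : Nat) : Int) n
        ((PySem.List.min? ((PySem.List.pyRange 1 (((lm+1 : Nat) : Int)+1) 1).map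
          (fun x => 1 + max (pvGet2 t2 (x-1) (n-1) + 5) (pvGet2 t2 (((lm+1 : Nat) : Int)-x) n)))
          (fun v => v)).getD 0))
      (matI LL NN lm 1)
    = matI LL NN lm nn := by
  induction nn, h1 using Nat.le_induction with
  | base => simp [PySem.List.pyRange_one_eq_nil]
  | succ nn h1 ih =>
    have hsplit : PySem.List.pyRange 2 ((nn+1 : Nat)+1 : Int) 1
        = PySem.List.pyRange 2 ((nn : Int)+1) 1 ++ [((nn:Int)+1)] := by
      push_cast
      exact PySem.List.pyRange_one_succ_right (by omega)
    rw [hsplit, List.foldl_append, ih (by omega), List.foldl_cons, List.foldl_nil]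
    have hval : (PySem.List.min? ((PySem.List.pyRange 1 (((lm+1 : Nat) : Int)+1) 1).map
        (fun x => 1 + max (pvGet2 (matI LL NN lm nn) (x-1) (((nn:Int)+1)-1) + 5)
                         (pvGet2 (matI LL NN lm nn) (((lm+1 : Nat) : Int)-x) ((nn:Int)+1))))
        (fun v => v)).getD 0 = T (nn+1) (lm+1) := by
      obtain ⟨m, rfl⟩ : ∃ m, nn = m + 1 := ⟨nn - 1, by omega⟩
      apply key_min m lm _ (by push_cast; ring)
      intro j hj
      have e1 : (1 + (j:Int)) - 1 = ((j : Nat) : Int) := by ring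
      have e2 : (((lm+1 : Nat) : Int)) - (1 + (j:Int)) = ((lm - j : Nat) : Int) := by
        push_cast; omega
      have e3 : ((((m+1:Nat)):Int)+1) - 1 = (((m+1 : Nat)) : Int) := by push_cast; ring
      have e4 : (((m+1:Nat)):Int)+1 = (((m+2 : Nat)) : Int) := by push_cast; ring
      rw [e1, e2, e3, e4]
      rw [matI_read LL NN lm (m+1) j (m+1) hj (by omega) (by omega),
          matI_read LL NN lm (m+1) (lm-j) (m+2) (by omega) (by omega) (by omega)]
    rw [hval]
    have ecast : ((nn : Int)+1) = (((nn+1 : Nat)) : Int) := by push_cast; ring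
    rw [ecast, set_inner LL NN lm nn hlm]

theorem A_outer (LL NN lm : Nat) (hlm : lm ≤ LL) (hNN : 1 ≤ NN) :
    (PySem.List.pyRange 1 ((lm : Int)+1) 1).foldl
      (fun t l =>
        (PySem.List.pyRange 2 ((NN : Int)+1) 1).foldl
          (fun t2 n => pvSet2 t2 l n
            ((PySem.List.min? ((PySem.List.pyRange 1 (l+1) 1).map
              (fun x => 1 + max (pvGet2 t2 (x-1) (n-1) + 5) (pvGet2 t2 (l-x) n)))
              (fun v => v)).getD 0))
          (pvSet2 t l 1 (l + 5)))
      (matF LL NN 0)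
    = matF LL NN lm := by
  induction lm with
  | zero => simp [PySem.List.pyRange_one_eq_nil]
  | succ lm ih =>
    have hsplit : PySem.List.pyRange 1 ((lm+1 : Nat)+1 : Int) 1
        = PySem.List.pyRange 1 ((lm : Int)+1) 1 ++ [((lm:Int)+1)] := by
      push_cast
      exact PySem.List.pyRange_one_succ_right (by omega)
    rw [hsplit, List.foldl_append, ih (by omega), List.foldl_cons, List.foldl_nil]
    have ecast : ((lm : Int)+1) = (((lm+1 : Nat)) : Int) := by push_cast; ring
    rw [ecast, set_col1 LL NN lm (by omega)]
    rw [A_inner LL NN lm NN (by omega) hNN le_rfl]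
    exact matI_full LL NN lm

theorem a_eq (N L : Int) (h : Pre_constCost N L) :
    constCost N L = T N.toNat L.toNat := by
  rcases h with ⟨h0, hN⟩ | ⟨hL, hN⟩
  · subst h0
    obtain ⟨NN, rfl⟩ : ∃ NN : Nat, N = ((NN : Nat) : Int) :=
      ⟨N.toNat, (Int.toNat_of_nonneg (by omega)).symm⟩
    simp only [constCost]
    rw [show (0:Int)+1 = 1 from rfl,
        show PySem.List.pyRange (1:Int) 1 1 = [] from PySem.List.pyRange_one_eq_nil le_rfl,
        List.foldl_nil]
    have h1 : ((1:Int)).toNat = 1 := rfl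
    have h2 : (((NN:Nat):Int)+1).toNat = NN+1 := by omega
    rw [h1, h2]
    simp [pvGet2, T_zero]
  · obtain ⟨LL, rfl⟩ : ∃ LL : Nat, L = ((LL : Nat) : Int) :=
      ⟨L.toNat, (Int.toNat_of_nonneg (by omega)).symm⟩
    obtain ⟨NN, rfl⟩ : ∃ NN : Nat, N = ((NN : Nat) : Int) :=
      ⟨N.toNat, (Int.toNat_of_nonneg (by omega)).symm⟩
    simp only [constCost]
    have h1 : (((LL:Nat):Int)+1).toNat = LL+1 := by omega
    have h2 : (((NN:Nat):Int)+1).toNat = NN+1 := by omega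
    rw [h1, h2, ← matF_zero LL NN]
    rw [A_outer LL NN LL le_rfl (by omega)]
    rw [matF_read LL NN LL LL NN le_rfl le_rfl le_rfl]
    simp

-- ===== B side: coverage function G and its link to T =====

-- G n c = maximal number of cells decidable with budget c and n crush levels
-- (what Source B's col[n] holds at budget c).
def G : Nat → Nat → Int
  | 0, _ => 0
  | 1, c => max ((c : Int) - 5) 0
  | n+2, c => if 6 ≤ c then 1 + G (n+1) (c-6) + G (n+2) (c-1) else 0
termination_by n c => (n, c)
decreasing_by
  · exact Prod.Lex.left _ _ (by omega)
  · exact Prod.Lex.right _ (by omega)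

theorem G_nonneg (n c : Nat) : 0 ≤ G n c := by
  induction n using Nat.strong_induction_on generalizing c with
  | _ n ih =>
    match n with
    | 0 => simp [G]
    | 1 => simp [G]
    | m+2 =>
      induction c using Nat.strong_induction_on with
      | _ c ihc =>
        rw [G]
        split_ifs with h
        · have h1 := ih (m+1) (by omega) (c-6)
          have h2 := ihc (c-1) (by omega)
          omega
        · omega

theorem T_nonneg (n l : Nat) : 0 ≤ T n l := by
  induction n using Nat.strong_induction_on generalizing l with
  | _ n ih =>
    match n with
    | 0 => rw [T_zero_left]
    | 1 =>
      cases l with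
      | zero => rw [T_zero]
      | succ k => rw [T]; have := Int.natCast_nonneg k; omega
    | m+2 =>
      cases l with
      | zero => rw [T_zero]
      | succ k =>
        rw [T]
        rcases hmin : PySem.List.min? ((List.range (k+1)).map (fun i =>
            1 + max (T (m+1) i + 5) (T (m+2) (k - i)))) (fun v => v) with _ | v
        · simp
        · have hv := PySem.List.min?_mem hmin
          simp only [List.mem_map, List.mem_range] at hv
          obtain ⟨i, hi, hveq⟩ := hv
          have h1 := ih (m+1) (by omega) i
          have h2 := le_max_left (T (m+1) i + 5) (T (m+2) (k - i))
          simp only [Option.getD_some]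
          omega

-- The central link: budget c suffices for l cells with n crushes iff l is within coverage.
theorem TG (n : Nat) (hn : 1 ≤ n) (c l : Nat) :
    (T n l ≤ (c : Int) ↔ (l : Int) ≤ G n c) := by
  induction n using Nat.strong_induction_on generalizing c l with
  | _ n ih =>
    match n, hn with
    | 1, _ =>
      cases l with
      | zero =>
        rw [T_zero]
        simp only [G]
        constructor
        · intro _; simp
        · intro _; exact Int.natCast_nonneg c
      | succ k =>
        rw [T]
        simp only [G, le_max_iff]
        push_cast
        omega
    | m+2, _ =>
      induction c using Nat.strong_induction_on generalizing l with
      | _ c ihc =>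
        cases l with
        | zero =>
          rw [T_zero]
          constructor
          · intro _; exact G_nonneg _ _
          · intro _; exact Int.natCast_nonneg c
        | succ k =>
          have hne : ((List.range (k+1)).map (fun i =>
              1 + max (T (m+1) i + 5) (T (m+2) (k - i)))) ≠ [] := by simp
          rcases hmin : PySem.List.min? ((List.range (k+1)).map (fun i =>
              1 + max (T (m+1) i + 5) (T (m+2) (k - i)))) (fun v => v) with _ | v
          · rw [PySem.List.min?_eq_none_iff] at hmin
            exact absurd hmin hne
          have hT : T (m+2) (k+1) = v := by rw [T, hmin]; rfl
          constructor
          · intro hvc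
            rw [hT] at hvc
            have hv := PySem.List.min?_mem hmin
            simp only [List.mem_map, List.mem_range] at hv
            obtain ⟨i, hi, hveq⟩ := hv
            have hT1 := T_nonneg (m+1) i
            have hT2 := T_nonneg (m+2) (k-i)
            have hm1 := le_max_left (T (m+1) i + 5) (T (m+2) (k - i))
            have hm2 := le_max_right (T (m+1) i + 5) (T (m+2) (k - i))
            have hc6 : 6 ≤ c := by
              have : (6:Int) ≤ c := by omega
              exact_mod_cast this
            have e6 : (((c-6:Nat)) : Int) = (c:Int) - 6 := by omega
            have e1 : (((c-1:Nat)) : Int) = (c:Int) - 1 := by omega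
            have hx1 : (i:Int) ≤ G (m+1) (c-6) :=
              (ih (m+1) (by omega) (by omega) (c-6) i).mp (by rw [e6]; omega)
            have hx2 : ((k-i : Nat):Int) ≤ G (m+2) (c-1) :=
              (ihc (c-1) (by omega) (k-i)).mp (by rw [e1]; omega)
            have ek : ((k-i : Nat):Int) = (k:Int) - i := by omega
            rw [G, if_pos hc6]
            push_cast
            omega
          · intro hG
            by_cases hc6 : 6 ≤ c
            swap
            · rw [G, if_neg hc6] at hG
              exfalso
              have : ((k:Int)+1) ≤ 0 := by push_cast at hG; omega
              omega
            rw [G, if_pos hc6] at hG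
            have hG1 := G_nonneg (m+1) (c-6)
            have hG2 := G_nonneg (m+2) (c-1)
            have e6 : (((c-6:Nat)) : Int) = (c:Int) - 6 := by omega
            have e1 : (((c-1:Nat)) : Int) = (c:Int) - 1 := by omega
            set i : Nat := min k (G (m+1) (c-6)).toNat with hidef
            have hik : i ≤ k := min_le_left _ _
            have hi1 : (i:Int) ≤ G (m+1) (c-6) := by
              have : (i:Int) ≤ ((G (m+1) (c-6)).toNat : Int) := by
                exact_mod_cast min_le_right k _
              rw [Int.toNat_of_nonneg hG1] at this
              exact this
            have hTi : T (m+1) i ≤ (c:Int) - 6 := by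
              rw [← e6]
              exact (ih (m+1) (by omega) (by omega) (c-6) i).mpr hi1
            have hi2 : ((k-i : Nat):Int) ≤ G (m+2) (c-1) := by
              by_cases hik2 : k ≤ (G (m+1) (c-6)).toNat
              · have : i = k := by omega
                rw [this]
                simp [hG2]
              · have : i = (G (m+1) (c-6)).toNat := by omega
                have hiG : (i:Int) = G (m+1) (c-6) := by
                  rw [this, Int.toNat_of_nonneg hG1]
                have ek : ((k-i : Nat):Int) = (k:Int) - i := by omega
                push_cast at hG
                omega
            have hTki : T (m+2) (k-i) ≤ (c:Int) - 1 := by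
              rw [← e1]
              exact (ihc (c-1) (by omega) (k-i)).mpr hi2
            have hmem : (1 + max (T (m+1) i + 5) (T (m+2) (k - i))) ∈
                ((List.range (k+1)).map (fun i =>
                  1 + max (T (m+1) i + 5) (T (m+2) (k - i)))) := by
              apply List.mem_map_of_mem
              exact List.mem_range.mpr (by omega)
            have hvle := PySem.List.min?_isMin hmin _ hmem
            have hmax : max (T (m+1) i + 5) (T (m+2) (k - i)) ≤ (c:Int) - 1 :=
              max_le (by omega) hTki
            rw [hT]
            omega

theorem G_ge (n : Nat) (hn : 1 ≤ n) (c : Nat) : (c:Int) - 5 ≤ G n c := by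
  match n, hn with
  | 1, _ => simp [G]
  | m+2, _ =>
    induction c using Nat.strong_induction_on with
    | _ c ihc =>
      rw [G]
      split_ifs with h
      · have h1 := G_nonneg (m+1) (c-6)
        have h2 := ihc (c-1) (by omega)
        have e1 : (((c-1:Nat)) : Int) = (c:Int) - 1 := by omega
        omega
      · have : c ≤ 5 := by omega
        have : (c:Int) ≤ 5 := by exact_mod_cast this
        omega

-- ===== B port correctness =====

def colG (NN c : Nat) : List Int := (List.range (NN+1)).map (fun n => G n c)

def colP (NN c nn : Nat) : List Int :=
  (List.range (NN+1)).map (fun n => if n ≤ nn then G n c else 0)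

theorem col1_eq (NN c : Nat) :
    PySem.List.pySetD (List.replicate (NN+1) (0:Int)) 1 (max ((c:Int)-5) 0)
      = colP NN c 1 := by
  rw [PySem.List.pySetD_of_nonneg _ _ (by omega)]
  apply List.ext_getElem
  · simp [colP]
  intro i h1 h2
  rw [List.getElem_set]
  simp only [colP, List.getElem_map, List.getElem_range, List.getElem_replicate]
  by_cases hi : (1:Int).toNat = i
  · have : i = 1 := by omega
    subst this
    simp [G]
  · rw [if_neg hi]
    by_cases hi0 : i = 0
    · subst hi0
      rw [if_pos (by omega)]
      simp [G]
    · rw [if_neg (by omega)]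

theorem colP_small (NN c nn : Nat) (h6 : ¬ (6:Int) ≤ (c:Int)) (h1 : 1 ≤ nn) :
    colP NN c 1 = colP NN c nn := by
  have hc : c < 6 := by omega
  unfold colP
  apply List.map_congr_left
  intro n _
  match n with
  | 0 => simp
  | 1 => simp [h1]
  | m+2 =>
    have h0 : G (m+2) c = 0 := by
      conv_lhs => rw [G]
      rw [if_neg (by omega)]
    simp [h0]

theorem colP_set (NN c nn : Nat) :
    PySem.List.pySetD (colP NN c nn) ((nn:Int)+1) (G (nn+1) c) = colP NN c (nn+1) := by
  have e : ((nn:Int)+1) = (((nn+1:Nat)):Int) := by push_cast; ring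
  rw [e, PySem.List.pySetD_of_nonneg _ _ (by omega)]
  apply List.ext_getElem
  · simp [colP]
  intro i h1 h2
  rw [List.getElem_set]
  simp only [colP, List.getElem_map, List.getElem_range]
  have ht : (((nn+1:Nat)):Int).toNat = nn+1 := by omega
  rw [ht]
  by_cases hi : nn+1 = i
  · subst hi
    rw [if_pos rfl, if_pos le_rfl]
  · rw [if_neg hi]
    by_cases h : i ≤ nn
    · rw [if_pos h, if_pos (by omega)]
    · rw [if_neg h, if_neg (by omega)]

theorem colP_full (NN c : Nat) : colP NN c NN = colG NN c := by
  unfold colP colG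
  apply List.map_congr_left
  intro n hn
  exact if_pos (Nat.lt_succ_iff.mp (List.mem_range.mp hn))

theorem B_inner (NN c nn : Nat) (h1 : 1 ≤ nn) (hnn : nn ≤ NN) :
    (PySem.List.pyRange 2 ((nn:Int)+1) 1).foldl
      (fun cl n =>
        if (6:Int) ≤ (c:Int) then
          PySem.List.pySetD cl n
            (1 + PySem.List.pyGetD
                   (PySem.List.pyGetD ((List.range c).map (colG NN)) ((c:Int)-6) []) (n-1) 0
               + PySem.List.pyGetD
                   (PySem.List.pyGetD ((List.range c).map (colG NN)) ((c:Int)-1) []) n 0)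
        else cl)
      (colP NN c 1)
    = colP NN c nn := by
  by_cases h6 : (6:Int) ≤ (c:Int)
  · have hc6 : 6 ≤ c := by exact_mod_cast h6
    induction nn, h1 using Nat.le_induction with
    | base => simp [PySem.List.pyRange_one_eq_nil]
    | succ nn h1 ih =>
      have hsplit : PySem.List.pyRange 2 ((nn+1 : Nat)+1 : Int) 1
          = PySem.List.pyRange 2 ((nn : Int)+1) 1 ++ [((nn:Int)+1)] := by
        push_cast
        exact PySem.List.pyRange_one_succ_right (by omega)
      rw [hsplit, List.foldl_append, ih (by omega), List.foldl_cons, List.foldl_nil,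
          if_pos h6]
      have e6 : ((c:Int)-6) = (((c-6:Nat)):Int) := by omega
      have e1 : ((c:Int)-1) = (((c-1:Nat)):Int) := by omega
      have en : ((nn:Int)+1-1) = ((nn:Nat):Int) := by ring
      have en2 : ((nn:Int)+1) = (((nn+1:Nat)):Int) := by push_cast; ring
      rw [e6, e1, PySem.List.pyGetD_natCast, PySem.List.pyGetD_natCast,
          PySem.List.getD_map_range _ _ _ _ (by omega),
          PySem.List.getD_map_range _ _ _ _ (by omega), en]
      rw [show PySem.List.pyGetD (colG NN (c-6)) ((nn:Nat):Int) 0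
            = (colG NN (c-6)).getD nn 0 from PySem.List.pyGetD_natCast _ _ _]
      rw [en2]
      rw [show PySem.List.pyGetD (colG NN (c-1)) (((nn+1:Nat)):Int) 0
            = (colG NN (c-1)).getD (nn+1) 0 from PySem.List.pyGetD_natCast _ _ _]
      unfold colG
      rw [PySem.List.getD_map_range _ _ _ _ (by omega),
          PySem.List.getD_map_range _ _ _ _ (by omega)]
      have hGval : G (nn+1) c = 1 + G nn (c-6) + G (nn+1) (c-1) := by
        obtain ⟨m, rfl⟩ : ∃ m, nn = m + 1 := ⟨nn - 1, by omega⟩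
        rw [show m+1+1 = m+2 from rfl]
        conv_lhs => rw [G]
        rw [if_pos hc6]
      rw [← hGval, ← en2, colP_set NN c nn]
  · have hid : ∀ (l : List Int) (cl : List Int),
        l.foldl (fun cl n =>
          if (6:Int) ≤ (c:Int) then
            PySem.List.pySetD cl n
              (1 + PySem.List.pyGetD
                     (PySem.List.pyGetD ((List.range c).map (colG NN)) ((c:Int)-6) []) (n-1) 0
                 + PySem.List.pyGetD
                     (PySem.List.pyGetD ((List.range c).map (colG NN)) ((c:Int)-1) []) n 0)
          else cl) cl = cl := by
      intro l
      induction l with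
      | nil => intro cl; rfl
      | cons x t iht => intro cl; rw [List.foldl_cons, if_neg h6]; exact iht cl
    rw [hid]
    exact colP_small NN c nn h6 h1

theorem bstep_some (N L : Int) (l : List Int) (g : List (List Int)) (v : Int) :
    (l.foldl (fun st c => bstep N L st c) (g, some v)).2 = some v := by
  induction l generalizing g with
  | nil => rfl
  | cons x t ih => exact ih g

theorem B_loop (NN LL : Nat) (hNN : 1 ≤ NN) (k0 : Nat) (hk0b : k0 ≤ LL+5)
    (hk0 : (LL:Int) ≤ G NN k0) (hk0min : ∀ c' < k0, ¬ (LL:Int) ≤ G NN c') :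
    ∀ d k, k + d = LL+6 → k ≤ k0 →
      (((PySem.List.pyRange (k:Int) ((LL:Int)+6) 1).foldl (bstep (NN:Int) (LL:Int))
        ((List.range k).map (colG NN), none)).2) = some (k0:Int) := by
  intro d
  induction d with
  | zero => intro k hk hkk0; omega
  | succ d ih =>
    intro k hk hkk0
    have hcons : PySem.List.pyRange (k:Int) ((LL:Int)+6) 1
        = (k:Int) :: PySem.List.pyRange ((k:Int)+1) ((LL:Int)+6) 1 :=
      PySem.List.pyRange_one_cons (by omega)
    rw [hcons, List.foldl_cons]
    have hcol : (PySem.List.pyRange 2 (((NN:Nat):Int)+1) 1).foldl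
        (fun cl n =>
          if (6:Int) ≤ (k:Int) then
            PySem.List.pySetD cl n
              (1 + PySem.List.pyGetD
                     (PySem.List.pyGetD ((List.range k).map (colG NN)) ((k:Int)-6) []) (n-1) 0
                 + PySem.List.pyGetD
                     (PySem.List.pyGetD ((List.range k).map (colG NN)) ((k:Int)-1) []) n 0)
          else cl)
        (PySem.List.pySetD (List.replicate (((NN:Nat):Int)+1).toNat (0:Int)) 1
          (max ((k:Int)-5) 0))
        = colG NN k := by
      have hrep : (((NN:Nat):Int)+1).toNat = NN+1 := by omega
      rw [hrep, col1_eq NN k, B_inner NN k NN hNN le_rfl, colP_full]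
    have hread : PySem.List.pyGetD (colG NN k) ((NN:Nat):Int) 0 = G NN k := by
      rw [PySem.List.pyGetD_natCast]
      unfold colG
      rw [PySem.List.getD_map_range _ _ _ _ (by omega)]
    by_cases hhit : (LL:Int) ≤ G NN k
    · have hkeq : k = k0 := by
        by_contra hne
        exact hk0min k (by omega) hhit
      subst hkeq
      have hstep : bstep (NN:Int) (LL:Int) ((List.range k).map (colG NN), none) (k:Int)
          = ((List.range k).map (colG NN) ++ [colG NN k], some (k:Int)) := by
        simp only [bstep, hcol, hread]
        rw [if_pos hhit]
      rw [hstep, bstep_some]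
    · have hstep : bstep (NN:Int) (LL:Int) ((List.range k).map (colG NN), none) (k:Int)
          = ((List.range k).map (colG NN) ++ [colG NN k], none) := by
        simp only [bstep, hcol, hread]
        rw [if_neg hhit]
      rw [hstep]
      have hglue : (List.range k).map (colG NN) ++ [colG NN k]
          = (List.range (k+1)).map (colG NN) := by
        rw [List.range_succ, List.map_append]
        rfl
      have hknek0 : k ≠ k0 := by
        intro h; subst h; exact hhit hk0
      have ecast : ((k:Int)+1) = (((k+1:Nat)):Int) := by push_cast; ring
      rw [hglue, ecast]
      exact ih (k+1) (by omega) (by omega)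

theorem alt_eq (N L : Int) (h : Pre_constCost N L) :
    constCost_alt N L = T N.toNat L.toNat := by
  rcases h with ⟨h0, hN⟩ | ⟨hL, hN⟩
  · subst h0
    simp [constCost_alt, T_zero]
  · obtain ⟨LL, rfl⟩ : ∃ LL : Nat, L = ((LL : Nat) : Int) :=
      ⟨L.toNat, (Int.toNat_of_nonneg (by omega)).symm⟩
    obtain ⟨NN, rfl⟩ : ∃ NN : Nat, N = ((NN : Nat) : Int) :=
      ⟨N.toNat, (Int.toNat_of_nonneg (by omega)).symm⟩
    have hLL : 1 ≤ LL := by omega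
    have hNN : 1 ≤ NN := by omega
    have hex : ∃ c : Nat, (LL:Int) ≤ G NN c := by
      refine ⟨LL+5, ?_⟩
      have := G_ge NN hNN (LL+5)
      have e : (((LL+5:Nat)):Int) = (LL:Int)+5 := by push_cast; ring
      omega
    set k0 := Nat.find hex with hk0def
    have hk0 : (LL:Int) ≤ G NN k0 := Nat.find_spec hex
    have hk0min : ∀ c' < k0, ¬ (LL:Int) ≤ G NN c' := fun c' hc' => Nat.find_min hex hc'
    have hk0b : k0 ≤ LL+5 := Nat.find_min' hex (by
      have := G_ge NN hNN (LL+5)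
      have e : (((LL+5:Nat)):Int) = (LL:Int)+5 := by push_cast; ring
      omega)
    have hloop := B_loop NN LL hNN k0 hk0b hk0 hk0min (LL+6) 0 (by omega) (by omega)
    have e0 : ((0:Nat):Int) = (0:Int) := rfl
    rw [e0] at hloop
    simp only [List.range_zero, List.map_nil] at hloop
    have hL0 : ((LL:Nat):Int) ≠ 0 := by omega
    simp only [constCost_alt, if_neg hL0]
    rw [hloop]
    simp only [Option.getD_some]
    -- (k0 : Int) = T NN LL via the coverage iff
    have ht0 := T_nonneg NN LL
    have h1 : T NN LL ≤ (k0:Int) := (TG NN hNN k0 LL).mpr hk0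
    have h2 : (LL:Int) ≤ G NN (T NN LL).toNat := by
      apply (TG NN hNN (T NN LL).toNat LL).mp
      rw [Int.toNat_of_nonneg ht0]
    have h3 : ¬ ((T NN LL).toNat < k0) := fun hc => hk0min _ hc h2
    have h4 : Int.toNat (((NN:Nat):Int)) = NN := by omega
    have h5 : Int.toNat (((LL:Nat):Int)) = LL := by omega
    rw [h4, h5]
    omega

-- ===== VERDICT (by name: the statement is the Claim_ definition above) =====
theorem constCost_spec : Claim_equal_constCost := by
  intro N L _ hpre
  unfold Spec_constCost
  rw [a_eq N L hpre, alt_eq N L hpre]
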